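-- pv_equiv track=rewrite | github.com/tommydcjung/hb_utilization | remote_load_stat.py | ruche_depop_delay
-- ===== SOURCE A (Python) =====
-- def ruche_depop_delay(rf_x, dx, dy):
--   delay_x = 0
--   curr_x = dx
--
--   while curr_x > 0:
--     if curr_x > rf_x:
--       curr_x -= rf_x
--       delay_x += 1
--     else:
--       curr_x -= 1
--       delay_x +=1
--
--   return (2*dy) + (2*delay_x)
-- ===== SOURCE B (Python) =====
-- def ruche_depop_delay(rf_x, dx, dy):
--   # closed form: big steps of rf_x until at most rf_x remains, then unit steps
--   if dx <= 0:
--     return 2 * dy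
--   q = (dx - 1) // rf_x
--   return 2 * dy + 2 * (q + (dx - q * rf_x))
-- ===== Notes on version B (the rewrite author's own statement) =====
-- stated objective: faster
-- what changed: Replaces the repeated-subtraction loop with a closed-form floor-division formula for the number of iterations.
import Mathlib
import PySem

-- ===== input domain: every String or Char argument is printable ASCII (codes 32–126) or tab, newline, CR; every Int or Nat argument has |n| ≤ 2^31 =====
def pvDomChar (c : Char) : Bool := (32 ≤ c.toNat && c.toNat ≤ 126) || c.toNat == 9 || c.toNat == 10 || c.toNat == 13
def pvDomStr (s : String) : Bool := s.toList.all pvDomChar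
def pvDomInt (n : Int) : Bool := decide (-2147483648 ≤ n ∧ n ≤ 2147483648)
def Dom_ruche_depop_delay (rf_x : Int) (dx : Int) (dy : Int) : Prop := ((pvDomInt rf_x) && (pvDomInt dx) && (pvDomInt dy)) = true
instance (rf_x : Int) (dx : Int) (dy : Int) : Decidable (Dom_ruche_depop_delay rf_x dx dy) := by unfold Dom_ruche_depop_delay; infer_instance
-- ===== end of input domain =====

-- B replaces A's repeated-subtraction loop with a closed-form floor-division formula (faster).

-- ===== PORT A =====
-- A's while loop; the fuel only makes the recursion total: under Pre_ (rf_x ≥ 1 when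
-- dx > 0) curr decreases by at least 1 each step, so dx.toNat fuel is never exhausted.
def pvLoopA (rf_x : Int) : Nat → Int → Int → Int
  | 0, _, delay_x => delay_x
  | f + 1, curr_x, delay_x =>
    if curr_x > 0 then
      if curr_x > rf_x then pvLoopA rf_x f (curr_x - rf_x) (delay_x + 1)
      else pvLoopA rf_x f (curr_x - 1) (delay_x + 1)
    else delay_x

def ruche_depop_delay (rf_x : Int) (dx : Int) (dy : Int) : Int :=
  (2 * dy) + (2 * pvLoopA rf_x dx.toNat dx 0)

-- ===== PORT B =====
def ruche_depop_delay_alt (rf_x : Int) (dx : Int) (dy : Int) : Int :=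
  if dx ≤ 0 then 2 * dy
  else
    let q := PySem.Int.floordiv (dx - 1) rf_x
    2 * dy + 2 * (q + (dx - q * rf_x))

-- ===== PRECONDITION & SPEC =====
-- Pre_ excludes exactly the inputs where A's loop never terminates (dx > 0 with rf_x ≤ 0).
def Pre_ruche_depop_delay (rf_x : Int) (dx : Int) (dy : Int) : Prop := dx ≤ 0 ∨ 1 ≤ rf_x
instance (rf_x : Int) (dx : Int) (dy : Int) : Decidable (Pre_ruche_depop_delay rf_x dx dy) := by unfold Pre_ruche_depop_delay; infer_instance

def pvWitness_ruche_depop_delay : Int × Int × Int := (3, 10, 2)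

def Spec_ruche_depop_delay (rf_x : Int) (dx : Int) (dy : Int) (out : Int) : Prop := out = ruche_depop_delay_alt rf_x dx dy
instance (rf_x : Int) (dx : Int) (dy : Int) (out : Int) : Decidable (Spec_ruche_depop_delay rf_x dx dy out) := by unfold Spec_ruche_depop_delay; infer_instance

-- ===== CLAIM (what is proved, stated in full; the proofs are below) =====
def Claim_equal_ruche_depop_delay : Prop := ∀ (rf_x : Int) (dx : Int) (dy : Int), Dom_ruche_depop_delay rf_x dx dy → Pre_ruche_depop_delay rf_x dx dy → Spec_ruche_depop_delay rf_x dx dy (ruche_depop_delay rf_x dx dy)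

-- ===== LEMMAS AND PROOFS =====

-- Closed form of the loop: with rf_x ≥ 1 and 0 ≤ curr ≤ f, the loop adds
-- q + (curr - q*rf_x) to delay, where q = (curr-1)/rf_x (0 when curr = 0).
theorem pvLoopA_closed (rf_x : Int) (hrf : 1 ≤ rf_x) :
    ∀ (f : Nat) (curr delay : Int), 0 ≤ curr → curr ≤ (f : Int) →
      pvLoopA rf_x f curr delay =
        if curr ≤ 0 then delay
        else delay + ((curr - 1) / rf_x + (curr - ((curr - 1) / rf_x) * rf_x)) := by
  intro f
  induction f with
  | zero =>
    intro curr delay h0 hf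
    have : curr = 0 := by omega
    simp [pvLoopA, this]
  | succ f ih =>
    intro curr delay h0 hf
    by_cases hpos : curr > 0
    · rw [if_neg (by omega)]
      by_cases hbig : curr > rf_x
      · have h1 : 0 ≤ curr - rf_x := by omega
        have h2 : curr - rf_x ≤ (f : Int) := by push_cast at hf ⊢; omega
        have hrec := ih (curr - rf_x) (delay + 1) h1 h2
        rw [show pvLoopA rf_x (f+1) curr delay = pvLoopA rf_x f (curr - rf_x) (delay + 1) by
              simp [pvLoopA, hpos, hbig]]
        rw [hrec, if_neg (by omega)]
        have hq : (curr - rf_x - 1) / rf_x = (curr - 1) / rf_x - 1 := by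
          have := Int.add_mul_ediv_right (curr - 1) (-1) (show rf_x ≠ 0 by omega)
          have harg : curr - rf_x - 1 = curr - 1 + (-1) * rf_x := by ring
          rw [harg, this]; ring
        rw [hq]; ring
      · have h1 : 0 ≤ curr - 1 := by omega
        have h2 : curr - 1 ≤ (f : Int) := by push_cast at hf ⊢; omega
        have hrec := ih (curr - 1) (delay + 1) h1 h2
        rw [show pvLoopA rf_x (f+1) curr delay = pvLoopA rf_x f (curr - 1) (delay + 1) by
              simp [pvLoopA, hpos, hbig]]
        rw [hrec]
        have hq0 : (curr - 1) / rf_x = 0 :=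
          Int.ediv_eq_zero_of_lt (by omega) (by omega)
        rw [hq0]
        by_cases hc1 : curr - 1 ≤ 0
        · rw [if_pos hc1]; omega
        · rw [if_neg hc1]
          have hq0' : (curr - 1 - 1) / rf_x = 0 :=
            Int.ediv_eq_zero_of_lt (by omega) (by omega)
          rw [hq0']; ring
    · rw [show pvLoopA rf_x (f+1) curr delay = delay by simp [pvLoopA, hpos]]
      rw [if_pos (by omega)]

-- ===== VERDICT (by name: the statement is the Claim_ definition above) =====
theorem ruche_depop_delay_spec : Claim_equal_ruche_depop_delay := by
  intro rf_x dx dy _ hpre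
  unfold Spec_ruche_depop_delay ruche_depop_delay ruche_depop_delay_alt
  by_cases hdx : dx ≤ 0
  · have ht : dx.toNat = 0 := by omega
    rw [ht, if_pos hdx]
    simp [pvLoopA]
  · have hrf : 1 ≤ rf_x := by rcases hpre with h | h <;> omega
    have h0 : (0:Int) ≤ dx := by omega
    have hle : dx ≤ (dx.toNat : Int) := by omega
    rw [pvLoopA_closed rf_x hrf dx.toNat dx 0 h0 hle, if_neg hdx, if_neg hdx]
    rw [PySem.Int.floordiv_eq_ediv_of_pos (by omega)]
    ring
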